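-- pv_equiv track=rewrite | github.com/AchillesWasonga/mp4mp3dloader | src/web_app.py | instagram_access_blocked
-- ===== SOURCE A (Python) =====
-- def instagram_access_blocked(log: str) -> bool:
--     lowered = log.lower()
--     signals = [
--         "instagram api is not granting access",
--         "empty media response",
--         "check if this post is accessible in your browser",
--         "login required",
--         "blocked public access",
--     ]
--     return any(s in lowered for s in signals)
-- ===== SOURCE B (Python) =====
-- SIGNALS = (
--     "instagram api is not granting access",
--     "empty media response",
--     "check if this post is accessible in your browser",
--     "login required",
--     "blocked public access",
-- )
--
--
-- def instagram_access_blocked(log: str) -> bool: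
--     # single left-to-right scan over positions instead of five separate substring searches
--     lowered = log.lower()
--     for i in range(len(lowered)):
--         for s in SIGNALS:
--             if lowered.startswith(s, i):
--                 return True
--     return False
-- ===== Notes on version B (the rewrite author's own statement) =====
-- stated objective: alternative
-- what changed: Replaces five independent whole-text substring searches with one left-to-right scan over positions that tests each signal as a prefix of the current suffix, so the text is traversed once.
import Mathlib
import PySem

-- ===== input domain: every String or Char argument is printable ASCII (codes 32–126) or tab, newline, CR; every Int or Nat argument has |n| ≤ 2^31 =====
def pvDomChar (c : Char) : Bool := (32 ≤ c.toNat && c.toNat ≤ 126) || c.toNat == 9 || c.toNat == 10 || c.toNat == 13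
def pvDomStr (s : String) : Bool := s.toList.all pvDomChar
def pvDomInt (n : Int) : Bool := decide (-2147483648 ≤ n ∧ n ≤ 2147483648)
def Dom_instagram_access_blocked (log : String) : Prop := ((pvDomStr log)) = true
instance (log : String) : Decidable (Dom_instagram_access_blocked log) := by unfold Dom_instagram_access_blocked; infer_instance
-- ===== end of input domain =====

-- B replaces five independent substring searches with one left-to-right position scan; alternative decomposition, same result.


-- ===== PORT A =====
def instagram_access_blocked (log : String) : Bool :=
  let lowered := PySem.Str.lower log
  let signals : List String :=
    [ "instagram api is not granting access"
    , "empty media response"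
    , "check if this post is accessible in your browser"
    , "login required"
    , "blocked public access" ]
  signals.any (fun s => PySem.Str.isIn s lowered)

-- ===== PORT B =====
def pvSignals : List String :=
  [ "instagram api is not granting access"
  , "empty media response"
  , "check if this post is accessible in your browser"
  , "login required"
  , "blocked public access" ]

-- the 'for i in range(len(lowered))' loop, as recursion over the successive suffixes of the text
def pvScan (cs : List Char) : Bool :=
  match cs with
  | [] => false
  | c :: t =>
    if pvSignals.any (fun s => PySem.Chars.startswith (c :: t) s.toList) then true
    else pvScan t

def instagram_access_blocked_alt (log : String) : Bool :=
  pvScan (PySem.Str.lower log).toList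

-- ===== PRECONDITION & SPEC =====
def Spec_instagram_access_blocked (log : String) (out : Bool) : Prop := out = instagram_access_blocked_alt log
instance (log : String) (out : Bool) : Decidable (Spec_instagram_access_blocked log out) := by unfold Spec_instagram_access_blocked; infer_instance

-- ===== CLAIM (what is proved, stated in full; the proofs are below) =====
def Claim_equal_instagram_access_blocked : Prop := ∀ (log : String), Dom_instagram_access_blocked log → Spec_instagram_access_blocked log (instagram_access_blocked log)

-- ===== LEMMAS AND PROOFS =====

lemma pvScan_iff (cs : List Char) :
    pvScan cs = true ↔ ∃ s ∈ pvSignals, s.toList <:+: cs := by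
  induction cs with
  | nil =>
    simp [pvScan]
    decide
  | cons c t ih =>
    simp only [pvScan]
    split_ifs with h
    · simp only [true_iff]
      rcases List.any_eq_true.mp h with ⟨s, hs, hsw⟩
      exact ⟨s, hs, (PySem.Chars.startswith_iff _ _).mp hsw |>.isInfix⟩
    · rw [ih]
      constructor
      · rintro ⟨s, hs, hinf⟩
        exact ⟨s, hs, List.infix_cons hinf⟩
      · rintro ⟨s, hs, hinf⟩
        rcases (List.infix_cons_iff).mp hinf with hpre | hinf'
        · exact absurd (List.any_eq_true.mpr ⟨s, hs, (PySem.Chars.startswith_iff _ _).mpr hpre⟩) h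
        · exact ⟨s, hs, hinf'⟩

-- ===== VERDICT (by name: the statement is the Claim_ definition above) =====
theorem instagram_access_blocked_spec : Claim_equal_instagram_access_blocked := by
  intro log _
  unfold Spec_instagram_access_blocked instagram_access_blocked instagram_access_blocked_alt
  apply Bool.eq_iff_iff.mpr
  rw [pvScan_iff]
  simp only [List.any_eq_true, PySem.Str.isIn_iff_infix]
  rfl
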